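-- pv_equiv track=rewrite | github.com/Swastika-Roy/Python-Tutorial | my programs/MaximumAsscendingSubArray.py | maxVarArr
-- ===== SOURCE A (Python) =====
-- def maxVarArr(arr):
--     n = len(arr)
--     maxm = arr[0]
--     currmax = arr[0]
--
--     for i in range(1,n):
--         if arr[i-1] < arr[i]:
--             currmax += arr[i]
--         else:
--             maxm = max(maxm,currmax)
--             currmax = arr[i]
--
--     maxm = max(currmax,maxm)
--     return maxm
-- ===== SOURCE B (Python) =====
-- def maxVarArr(arr):
--     # break indices -> slice the array into maximal strictly-ascending segments,
--     # sum each slice, one max over the first element and the segment sums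
--     n = len(arr)
--     bounds = [0] + [i for i in range(1, n) if arr[i - 1] >= arr[i]] + [n]
--     sums = [sum(arr[a:b]) for a, b in zip(bounds, bounds[1:])]
--     return max([arr[0]] + sums)
-- ===== Notes on version B (the rewrite author's own statement) =====
-- stated objective: alternative
-- what changed: B carries no accumulator through a scan: it first computes the break indices with a filter over range(1,n), forms the segment boundaries, then sums each slice between consecutive boundary pairs and takes a single max over the first element and those slice sums, instead of A's one pass threading (running maximum, current run sum) through every index.
import Mathlib
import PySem

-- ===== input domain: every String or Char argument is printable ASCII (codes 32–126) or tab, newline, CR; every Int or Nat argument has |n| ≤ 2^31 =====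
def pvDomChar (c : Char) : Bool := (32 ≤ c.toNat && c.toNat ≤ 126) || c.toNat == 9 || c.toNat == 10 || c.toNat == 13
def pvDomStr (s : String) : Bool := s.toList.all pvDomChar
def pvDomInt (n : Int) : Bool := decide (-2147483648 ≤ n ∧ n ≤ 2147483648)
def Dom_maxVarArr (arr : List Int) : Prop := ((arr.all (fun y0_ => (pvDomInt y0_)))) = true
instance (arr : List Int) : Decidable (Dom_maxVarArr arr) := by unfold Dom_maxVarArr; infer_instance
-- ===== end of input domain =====

-- B replaces A's accumulator-threading single pass by staged passes: break indices via a
-- filtered range, then slice sums over consecutive boundary pairs, then one max (objective: alternative).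

-- ===== PORT A =====
-- loop body of A's 'for i in range(1, n)': state (maxm, currmax)
def stepA (arr : List Int) (st : Int × Int) (i : Int) : Int × Int :=
  if PySem.List.pyGetD arr (i - 1) 0 < PySem.List.pyGetD arr i 0 then
    (st.1, st.2 + PySem.List.pyGetD arr i 0)
  else
    (max st.1 st.2, PySem.List.pyGetD arr i 0)

def maxVarArr (arr : List Int) : Int :=
  let n := PySem.List.len arr
  let maxm := PySem.List.pyGetD arr 0 0       -- first element; IndexError on empty input is excluded by Pre_
  let currmax := maxm
  let st := (PySem.List.pyRange 1 n 1).foldl (stepA arr) (maxm, currmax)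
  max st.2 st.1

-- ===== PORT B =====
-- Source B: bounds = [0] + break indices + [n]; sums of slices over consecutive bound pairs; one max
def maxVarArr_alt (arr : List Int) : Int :=
  let n := PySem.List.len arr
  let bounds := 0 :: ((PySem.List.pyRange 1 n 1).filter
      (fun i => decide (PySem.List.pyGetD arr i 0 ≤ PySem.List.pyGetD arr (i - 1) 0)) ++ [n])
  let sums := (bounds.zip bounds.tail).map
      (fun ab => (PySem.List.slice arr (some ab.1) (some ab.2)).sum)
  sums.foldl max (PySem.List.pyGetD arr 0 0)   -- max over the first element and sums; raises on empty input

-- ===== PRECONDITION & SPEC =====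
-- Pre_ excludes only the empty list, on which Python A raises IndexError (B does too).
def Pre_maxVarArr (arr : List Int) : Prop := arr ≠ []
instance (arr : List Int) : Decidable (Pre_maxVarArr arr) := by unfold Pre_maxVarArr; infer_instance
def pvWitness_maxVarArr : List Int := [1, 2, 3]

def Spec_maxVarArr (arr : List Int) (out : Int) : Prop := out = maxVarArr_alt arr
instance (arr : List Int) (out : Int) : Decidable (Spec_maxVarArr arr out) := by unfold Spec_maxVarArr; infer_instance

-- ===== CLAIM (what is proved, stated in full; the proofs are below) =====
def Claim_equal_maxVarArr : Prop := ∀ (arr : List Int), Dom_maxVarArr arr → Pre_maxVarArr arr → Spec_maxVarArr arr (maxVarArr arr)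

-- ===== LEMMAS AND PROOFS =====

-- A's loop, reformulated structurally: state (maxm, currmax) driven by (prev element, rest of list)
def stepFold (prev : Int) (t : List Int) (st : Int × Int) : Int × Int :=
  match t with
  | [] => st
  | x :: xs => stepFold x xs (if prev < x then (st.1, st.2 + x) else (max st.1 st.2, x))

lemma getD_append_cons_length (pre : List Int) (y : Int) (ys : List Int) :
    (pre ++ y :: ys).getD pre.length 0 = y := by
  simp [List.getD_eq_getElem?_getD]

lemma getD_append_cons_length_succ (pre : List Int) (y x : Int) (ys : List Int) :
    (pre ++ y :: x :: ys).getD (pre.length + 1) 0 = x := by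
  have h := getD_append_cons_length (pre ++ [y]) x ys
  simpa [List.append_assoc] using h

-- A's indexed foldl over range(i, n) equals the structural stepFold
lemma loopA (t pre : List Int) (prev : Int) (st : Int × Int) :
    (PySem.List.pyRange ((pre.length : Int) + 1) ((pre.length : Int) + 1 + t.length) 1).foldl
      (stepA (pre ++ prev :: t)) st = stepFold prev t st := by
  induction t generalizing pre prev st with
  | nil =>
      rw [PySem.List.pyRange_one_eq_nil (by simp)]
      rfl
  | cons x xs ih =>
      rw [PySem.List.pyRange_one_cons (by
        have : ((x :: xs).length : Int) = (xs.length : Int) + 1 := by simp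
        omega)]
      rw [List.foldl_cons]
      have hbody : stepA (pre ++ prev :: x :: xs) st ((pre.length : Int) + 1) =
          (if prev < x then (st.1, st.2 + x) else (max st.1 st.2, x)) := by
        have h1 : ((pre.length : Int) + 1) - 1 = ((pre.length : Nat) : Int) := by omega
        have h2 : ((pre.length : Int) + 1) = (((pre.length + 1 : Nat)) : Int) := by push_cast; omega
        rw [stepA, h1]
        rw [h2, PySem.List.pyGetD_natCast, PySem.List.pyGetD_natCast]
        rw [getD_append_cons_length, getD_append_cons_length_succ]
      rw [hbody]
      have ih' := ih (pre ++ [prev]) x (if prev < x then (st.1, st.2 + x) else (max st.1 st.2, x))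
      simp only [List.length_append, List.length_cons, List.length_nil, List.append_assoc,
        List.cons_append, List.nil_append] at ih' ⊢
      rw [stepFold]
      convert ih' using 3 <;> push_cast <;> omega

-- the maximal ascending run sums, structurally
def bRuns (prev run : Int) : List Int → List Int
  | [] => [run]
  | x :: xs => if prev < x then bRuns x (run + x) xs else run :: bRuns x x xs

-- max over bRuns, folded from m, is A's final 'max(currmax, maxm)' on stepFold's state
lemma step_runs (t : List Int) (prev run m : Int) :
    (bRuns prev run t).foldl max m =
      max (stepFold prev t (m, run)).2 (stepFold prev t (m, run)).1 := by
  induction t generalizing prev run m with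
  | nil => simp [bRuns, stepFold, max_comm]
  | cons x xs ih =>
      by_cases h : prev < x
      · simp only [bRuns, stepFold, if_pos h]
        exact ih x (run + x) m
      · simp only [bRuns, stepFold, if_neg h, List.foldl_cons]
        exact ih x x (max m run)

-- A = foldl max (first element) over the run sums
lemma A_runs (h : Int) (t : List Int) :
    maxVarArr (h :: t) = (bRuns h h t).foldl max h := by
  have hl := loopA t [] h (h, h)
  simp only [List.length_nil, List.nil_append, Nat.cast_zero, zero_add] at hl
  show max ((PySem.List.pyRange 1 (PySem.List.len (h :: t)) 1).foldl
      (stepA (h :: t)) (PySem.List.pyGetD (h :: t) 0 0, PySem.List.pyGetD (h :: t) 0 0)).2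
    ((PySem.List.pyRange 1 (PySem.List.len (h :: t)) 1).foldl
      (stepA (h :: t)) (PySem.List.pyGetD (h :: t) 0 0, PySem.List.pyGetD (h :: t) 0 0)).1 = _
  rw [PySem.List.pyGetD_zero_cons]
  have hn : PySem.List.len (h :: t) = (1 : Int) + t.length := by
    simp [PySem.List.len_eq]; omega
  rw [hn, hl, step_runs t h h h]

-- B's break-index comprehension, structurally: cut positions of the maximal runs
def cutsOf (pos prev : Int) : List Int → List Int
  | [] => []
  | x :: xs => if prev < x then cutsOf (pos + 1) x xs else pos :: cutsOf (pos + 1) x xs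

-- B's filtered range of break indices equals the structural cutsOf
lemma cuts_eq (t : List Int) : ∀ (pre : List Int) (prev : Int) (arr : List Int),
    arr = pre ++ prev :: t →
    (PySem.List.pyRange ((pre.length : Int) + 1) ((pre.length : Int) + 1 + t.length) 1).filter
      (fun i => decide (PySem.List.pyGetD arr i 0 ≤ PySem.List.pyGetD arr (i - 1) 0))
    = cutsOf ((pre.length : Int) + 1) prev t := by
  induction t with
  | nil =>
      intro pre prev arr harr
      rw [PySem.List.pyRange_one_eq_nil (by simp)]
      rfl
  | cons x xs ih =>
      intro pre prev arr harr
      subst harr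
      rw [PySem.List.pyRange_one_cons (by
        have : ((x :: xs).length : Int) = (xs.length : Int) + 1 := by simp
        omega)]
      rw [List.filter_cons]
      have h1 : ((pre.length : Int) + 1) - 1 = ((pre.length : Nat) : Int) := by omega
      have h2 : ((pre.length : Int) + 1) = (((pre.length + 1 : Nat)) : Int) := by push_cast; omega
      have hget1 : PySem.List.pyGetD (pre ++ prev :: x :: xs) ((pre.length : Int) + 1) 0 = x := by
        rw [h2, PySem.List.pyGetD_natCast, getD_append_cons_length_succ]
      have hget0 : PySem.List.pyGetD (pre ++ prev :: x :: xs) (((pre.length : Int) + 1) - 1) 0 = prev := by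
        rw [h1, PySem.List.pyGetD_natCast, getD_append_cons_length]
      rw [hget1, hget0]
      have ih' := ih (pre ++ [prev]) x (pre ++ prev :: x :: xs) (by simp)
      simp only [List.length_append, List.length_cons, List.length_nil] at ih' ⊢
      by_cases hlt : prev < x
      · rw [if_neg (by simp [not_le.mpr hlt]), cutsOf, if_pos hlt]
        convert ih' using 3 <;> push_cast <;> omega
      · rw [if_pos (decide_eq_true (not_lt.mp hlt)), cutsOf, if_neg hlt]
        rw [List.cons.injEq]
        refine ⟨rfl, ?_⟩
        convert ih' using 3 <;> push_cast <;> omega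

-- sum of a Python slice
def sliceSum (arr : List Int) (a b : Int) : Int :=
  (PySem.List.slice arr (some a) (some b)).sum

lemma slice_split (arr : List Int) (a b : Int) (h0 : 0 ≤ a) (hab : a ≤ b) :
    sliceSum arr a b = sliceSum arr 0 b - sliceSum arr 0 a := by
  have h0b : (0:Int) ≤ b := le_trans h0 hab
  unfold sliceSum
  rw [PySem.List.slice_toNat arr h0 h0b, PySem.List.slice_toNat arr le_rfl h0b,
      PySem.List.slice_toNat arr le_rfl h0]
  simp only [List.drop_zero, Int.toNat_zero, Nat.sub_zero]
  have hab' : a.toNat ≤ b.toNat := Int.toNat_le_toNat hab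
  have hsplit : arr.take b.toNat = arr.take a.toNat ++ (arr.take b.toNat).drop a.toNat := by
    conv_lhs => rw [← List.take_append_drop a.toNat (arr.take b.toNat)]
    rw [List.take_take, min_eq_left hab']
  rw [← List.drop_take]
  have := congrArg List.sum hsplit
  rw [List.sum_append] at this
  omega

-- slicing at the structural cut positions yields exactly the run sums
lemma segs_main (arr : List Int) :
    ∀ (t : List Int) (pos prev start : Int), 0 ≤ start → start ≤ pos →
    (∀ i : Nat, i < t.length →
        sliceSum arr 0 (pos + i + 1) = sliceSum arr 0 (pos + i) + t.getD i 0) →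
    (((start :: (cutsOf pos prev t ++ [pos + t.length])).zip
        (cutsOf pos prev t ++ [pos + t.length])).map
        (fun ab => (PySem.List.slice arr (some ab.1) (some ab.2)).sum))
      = bRuns prev (sliceSum arr 0 pos - sliceSum arr 0 start) t := by
  intro t
  induction t with
  | nil =>
      intro pos prev start h0 hsp _
      simp only [cutsOf, List.length_nil, Nat.cast_zero, add_zero, List.nil_append,
        List.zip_cons_cons, List.zip_nil_right, List.map_cons, List.map_nil, bRuns]
      rw [← slice_split arr start pos h0 hsp]
      rfl
  | cons x xs ih =>
      intro pos prev start h0 hsp hstep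
      have hx : sliceSum arr 0 (pos + 1) = sliceSum arr 0 pos + x := by
        have := hstep 0 (by simp)
        simpa using this
      have hstep' : ∀ i : Nat, i < xs.length →
          sliceSum arr 0 ((pos + 1) + i + 1) = sliceSum arr 0 ((pos + 1) + i) + xs.getD i 0 := by
        intro i hi
        have := hstep (i + 1) (by simpa using Nat.succ_lt_succ hi)
        have harith : pos + ((i : Int) + 1) = (pos + 1) + i := by ring
        simpa [harith, add_assoc] using this
      have hlen : pos + ((x :: xs).length : Int) = (pos + 1) + (xs.length : Int) := by
        push_cast [List.length_cons]; ring
      by_cases hlt : prev < x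
      · rw [cutsOf, if_pos hlt, bRuns, if_pos hlt, hlen]
        have := ih (pos + 1) x start h0 (by omega) hstep'
        rw [this, hx]
        ring_nf
      · rw [cutsOf, if_neg hlt, bRuns, if_neg hlt, hlen]
        simp only [List.cons_append, List.zip_cons_cons, List.map_cons]
        rw [← slice_split arr start pos h0 hsp]
        rw [List.cons.injEq]
        refine ⟨rfl, ?_⟩
        have := ih (pos + 1) x pos (by omega) (by omega) hstep'
        rw [this, hx]
        ring_nf

-- the step hypothesis holds for arr = h :: t at pos = 1
lemma hstep_holds (h : Int) (t : List Int) :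
    ∀ i : Nat, i < t.length →
      sliceSum (h :: t) 0 ((1 : Int) + i + 1) = sliceSum (h :: t) 0 ((1 : Int) + i) + t.getD i 0 := by
  intro i hi
  unfold sliceSum
  have e1 : (1 : Int) + i + 1 = ((i + 2 : Nat) : Int) := by push_cast; ring
  have e2 : (1 : Int) + i = ((i + 1 : Nat) : Int) := by push_cast; ring
  rw [e1, e2, PySem.List.slice_zero_start, PySem.List.slice_zero_start,
      PySem.List.slice_to_natCast, PySem.List.slice_to_natCast]
  simp only [List.take_succ_cons, List.sum_cons]
  rw [List.take_succ, List.sum_append]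
  have : t[i]?.toList.sum = t.getD i 0 := by
    rw [List.getElem?_eq_getElem hi]
    simp [List.getD_eq_getElem?_getD, List.getElem?_eq_getElem hi]
  omega

-- B = foldl max (first element) over the run sums
lemma B_runs (h : Int) (t : List Int) :
    maxVarArr_alt (h :: t) = (bRuns h h t).foldl max h := by
  show ((((0 : Int) :: _).zip _).map _).foldl max (PySem.List.pyGetD (h :: t) 0 0) = _
  rw [PySem.List.pyGetD_zero_cons]
  have hn : PySem.List.len (h :: t) = (1 : Int) + t.length := by
    simp [PySem.List.len_eq]; omega
  have hcuts := cuts_eq t [] h (h :: t) (by simp)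
  simp only [List.length_nil, Nat.cast_zero, zero_add] at hcuts
  rw [hn]
  simp only [hcuts]
  have hmain := segs_main (h :: t) t 1 h 0 le_rfl (by omega) (hstep_holds h t)
  simp only [List.tail_cons]
  rw [hmain]
  have hseed : sliceSum (h :: t) 0 1 - sliceSum (h :: t) 0 0 = h := by
    unfold sliceSum
    have e1 : (1 : Int) = ((1 : Nat) : Int) := by norm_num
    have e0 : (0 : Int) = ((0 : Nat) : Int) := by norm_num
    rw [e1, e0, PySem.List.slice_natCast, PySem.List.slice_natCast]
    simp
  rw [hseed]

-- ===== VERDICT (by name: the statement is the Claim_ definition above) =====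
theorem maxVarArr_spec : Claim_equal_maxVarArr := by
  intro arr _ hpre
  unfold Spec_maxVarArr
  obtain ⟨h, t, rfl⟩ : ∃ h t, arr = h :: t := by
    cases arr with
    | nil => exact absurd rfl hpre
    | cons h t => exact ⟨h, t, rfl⟩
  rw [A_runs, B_runs]
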